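-- pv_equiv track=rewrite | github.com/Hayford08/advent-of-code | 2023/Day13/day13.py | isColReflection
-- ===== SOURCE A (Python) =====
-- def isColReflection(grid, col):
-- 	for row in grid:
-- 		l, r = col, col + 1
-- 		while l >= 0 and r < len(row):
-- 			if row[l] != row[r]:
-- 				return False
-- 			l -= 1
-- 			r += 1
-- 	return True
-- ===== SOURCE B (Python) =====
-- def isColReflection(grid, col):
--     if col < 0:
--         return True
--     for row in grid:
--         left = row[:col + 1][::-1]
--         right = row[col + 1:]
--         n = min(len(left), len(right))
--         if left[:n] != right[:n]:
--             return False
--     return True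
-- ===== Notes on version B (the rewrite author's own statement) =====
-- stated objective: simpler
-- what changed: Replaces the per-row incremental two-pointer expansion around the mirror line by building each row's reversed left prefix and right suffix once and comparing their common-length prefixes with a single slice equality (with an explicit early True for col < 0, where no comparison ever happens).
import Mathlib
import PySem

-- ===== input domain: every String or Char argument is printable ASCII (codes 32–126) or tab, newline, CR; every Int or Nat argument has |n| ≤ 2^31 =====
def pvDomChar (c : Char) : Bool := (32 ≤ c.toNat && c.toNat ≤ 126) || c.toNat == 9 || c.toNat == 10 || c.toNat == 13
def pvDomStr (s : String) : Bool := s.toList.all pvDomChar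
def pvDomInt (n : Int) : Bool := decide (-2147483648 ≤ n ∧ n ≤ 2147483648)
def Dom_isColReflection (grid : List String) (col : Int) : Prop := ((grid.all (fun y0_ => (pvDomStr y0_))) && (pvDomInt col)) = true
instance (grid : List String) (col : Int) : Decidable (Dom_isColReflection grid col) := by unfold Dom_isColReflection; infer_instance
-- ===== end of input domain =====

-- B replaces A's per-row two-pointer while-loop by one reversed-prefix/suffix slice comparison per row (simpler decomposition; return value only, no side effects involved).

-- ===== PORT A =====
-- the inner `while l >= 0 and r < len(row)` loop; row[l] / row[r] via pyGet? (both in range whenever compared)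
def pvAWhile (row : List Char) (l r : Int) : Bool :=
  if 0 ≤ l ∧ r < PySem.List.len row then
    if PySem.List.pyGet? row l ≠ PySem.List.pyGet? row r then false
    else pvAWhile row (l - 1) (r + 1)
  else true
termination_by (l + 1).toNat
decreasing_by omega

def isColReflection (grid : List String) (col : Int) : Bool :=
  match grid with
  | [] => true
  | row :: rest =>
    if pvAWhile row.toList col (col + 1) then isColReflection rest col else false

-- ===== PORT B =====
-- one row of B: left = row[:col+1][::-1], right = row[col+1:], compare the common prefix
-- ([::-1] is List.reverse, exact by PySem.List.slice?_none_none_neg_one; left[:n]/right[:n] with n : Nat is List.take n)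
def pvBRow (row : List Char) (col : Int) : Bool :=
  let left := (PySem.List.slice row none (some (col + 1))).reverse
  let right := PySem.List.slice row (some (col + 1)) none
  let n := min left.length right.length
  left.take n == right.take n

def pvBGo (grid : List String) (col : Int) : Bool :=
  match grid with
  | [] => true
  | row :: rest => if pvBRow row.toList col then pvBGo rest col else false

def isColReflection_alt (grid : List String) (col : Int) : Bool :=
  if col < 0 then true else pvBGo grid col

-- ===== PRECONDITION & SPEC =====
def Spec_isColReflection (grid : List String) (col : Int) (out : Bool) : Prop := out = isColReflection_alt grid col
instance (grid : List String) (col : Int) (out : Bool) : Decidable (Spec_isColReflection grid col out) := by unfold Spec_isColReflection; infer_instance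

-- ===== CLAIM (what is proved, stated in full; the proofs are below) =====
def Claim_equal_isColReflection : Prop := ∀ (grid : List String) (col : Int), Dom_isColReflection grid col → Spec_isColReflection grid col (isColReflection grid col)

-- ===== LEMMAS AND PROOFS =====

-- A's while-loop computed as the slice comparison, generalised over the loop state
lemma pvAWhile_eq_slices (row : List Char) :
    ∀ (n : Nat) (l r : Int), 0 ≤ r → l < r →
      n = min (l + 1).toNat (row.length - r.toNat) →
      pvAWhile row l r = ((row.take (l + 1).toNat).reverse.take n == (row.drop r.toNat).take n) := by
  intro n
  induction n with
  | zero =>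
    intro l r hr hlr hn
    rw [pvAWhile]
    rw [if_neg]
    · simp
    · simp only [PySem.List.len_eq]
      omega
  | succ n ih =>
    intro l r hr hlr hn
    have hl : 0 ≤ l := by omega
    have hrlen : r.toNat < row.length := by omega
    have hllen : l.toNat < row.length := by omega
    have hl1 : (l + 1).toNat = l.toNat + 1 := by omega
    rw [pvAWhile]
    rw [if_pos (by simp only [PySem.List.len_eq]; omega)]
    rw [PySem.List.pyGet?_eq_some_getElem row hl (by exact_mod_cast (by omega : l < (row.length : Int))),
        PySem.List.pyGet?_eq_some_getElem row hr (by exact_mod_cast (by omega : r < (row.length : Int)))]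
    rw [hl1]
    have hgl : row[l.toNat]? = some row[l.toNat] := List.getElem?_eq_getElem hllen
    have hleft : (List.take (l.toNat + 1) row).reverse
        = row[l.toNat] :: (List.take l.toNat row).reverse := by
      rw [List.take_add_one, hgl]; simp
    have hdrop : row.drop r.toNat = row[r.toNat] :: row.drop (r.toNat + 1) :=
      List.drop_eq_getElem_cons hrlen
    rw [hleft, hdrop]
    simp only [List.take_succ_cons, List.cons_beq_cons]
    by_cases hc : row[l.toNat] = row[r.toNat]
    · rw [if_neg (by simp [hc])]
      have := ih (l - 1) (r + 1) (by omega) (by omega) (by omega)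
      rw [this]
      have h1 : (l - 1 + 1).toNat = l.toNat := by omega
      have h2 : (r + 1).toNat = r.toNat + 1 := by omega
      rw [h1, h2]
      simp [hc]
    · rw [if_pos (by simp [hc])]
      simp [hc]

-- one row: A's walk equals B's slice comparison, for 0 ≤ col
lemma pvRow_eq (row : List Char) (col : Int) (hc : 0 ≤ col) :
    pvAWhile row col (col + 1) = pvBRow row col := by
  have hc1 : (0 : Int) ≤ col + 1 := by omega
  show pvAWhile row col (col + 1) = _
  unfold pvBRow
  simp only []
  rw [PySem.List.slice_to row hc1, PySem.List.slice_from row hc1]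
  simp only [List.length_reverse, List.length_take, List.length_drop]
  have hmin : min (min (col + 1).toNat row.length) (row.length - (col + 1).toNat)
      = min (col + 1).toNat (row.length - (col + 1).toNat) := by omega
  rw [hmin]
  exact pvAWhile_eq_slices row _ col (col + 1) hc1 (by omega) (by omega)

-- negative col: A's loop condition fails immediately on every row
lemma pvAWhile_neg (row : List Char) (l r : Int) (hl : l < 0) : pvAWhile row l r = true := by
  rw [pvAWhile, if_neg]
  omega

lemma pvA_neg (grid : List String) (col : Int) (hc : col < 0) : isColReflection grid col = true := by
  induction grid with
  | nil => rfl
  | cons row rest ih =>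
    rw [isColReflection, pvAWhile_neg _ _ _ hc, if_pos rfl]
    exact ih

lemma pvA_eq_bgo (grid : List String) (col : Int) (hc : 0 ≤ col) :
    isColReflection grid col = pvBGo grid col := by
  induction grid with
  | nil => rfl
  | cons row rest ih =>
    rw [isColReflection, pvBGo, pvRow_eq _ _ hc, ih]

-- ===== VERDICT (by name: the statement is the Claim_ definition above) =====
theorem isColReflection_spec : Claim_equal_isColReflection := by
  intro grid col _
  unfold Spec_isColReflection isColReflection_alt
  by_cases hc : col < 0
  · rw [if_pos hc, pvA_neg grid col hc]
  · rw [if_neg hc, pvA_eq_bgo grid col (by omega)]
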